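-- pv_equiv track=rewrite | github.com/BenOnTheBoard/algmatch | src/algmatch/stableMatchings/studentProjectAllocation/ties/spastWeakSolver.py | _get_outranked_entities
-- ===== SOURCE A (Python) =====
-- def _get_outranked_entities(preference_list, entity, strict=False) -> list:
--     """
--     Get entities that outrank entity in preference list
--
--     :param strict: if True, only return entities that strictly outrank entity
--     """
--     if len(preference_list) == 0: return []
--
--     idx = 0
--     p = preference_list[idx]
--     outranked_projects = []
--     while entity not in p:
--         outranked_projects += p
--         idx += 1
--         if idx == len(preference_list): return outranked_projects
--         p = preference_list[idx]
--
--     outranked_projects += p if not strict else []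
--     return outranked_projects
-- ===== SOURCE B (Python) =====
-- def _get_outranked_entities(preference_list, entity, strict=False) -> list:
--     target = next((i for i, p in enumerate(preference_list) if entity in p), None)
--     if target is None:
--         end = len(preference_list)
--     else:
--         end = target if strict else target + 1
--     result = []
--     for p in preference_list[:end]:
--         result += p
--     return result
-- ===== Notes on version B (the rewrite author's own statement) =====
-- stated objective: simpler
-- what changed: B splits the task into two phases: first locate the index of the tie-group containing entity (next over enumerate), then flatten the prefix of groups up to that cut-off, instead of A's interleaved while-loop that searches and accumulates with index bookkeeping and mid-loop returns.
import Mathlib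
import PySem

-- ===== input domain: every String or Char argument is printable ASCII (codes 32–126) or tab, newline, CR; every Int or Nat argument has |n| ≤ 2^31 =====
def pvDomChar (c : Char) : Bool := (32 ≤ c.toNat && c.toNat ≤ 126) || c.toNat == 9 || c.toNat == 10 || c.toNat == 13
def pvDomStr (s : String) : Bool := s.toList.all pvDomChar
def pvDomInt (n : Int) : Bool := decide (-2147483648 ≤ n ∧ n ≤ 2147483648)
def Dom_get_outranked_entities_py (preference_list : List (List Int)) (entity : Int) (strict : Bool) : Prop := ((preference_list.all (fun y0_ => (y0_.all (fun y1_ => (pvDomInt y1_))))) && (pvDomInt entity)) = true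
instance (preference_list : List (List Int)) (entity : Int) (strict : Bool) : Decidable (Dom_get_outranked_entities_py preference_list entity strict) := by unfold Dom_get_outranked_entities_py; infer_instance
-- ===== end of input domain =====

-- B replaces A's interleaved search-and-accumulate while-loop by a two-phase shape
-- (find the index of the group containing entity, then flatten the prefix); objective: simpler.

-- ===== PORT A =====
-- A's while loop: p is the current group, acc the accumulated outranked entities;
-- 'entity in p' ends the loop, otherwise acc += p and idx advances (returning acc at the end).
def pvALoop (entity : Int) (strict : Bool) (acc : List Int) (p : List Int) (rest : List (List Int)) : List Int :=
  if entity ∈ p then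
    acc ++ (if strict then [] else p)   -- 'outranked_projects += p if not strict else []'
  else
    match rest with
    | [] => acc ++ p                    -- 'if idx == len(preference_list): return outranked_projects'
    | q :: rest' => pvALoop entity strict (acc ++ p) q rest'

def get_outranked_entities_py (preference_list : List (List Int)) (entity : Int) (strict : Bool) : List Int :=
  match preference_list with
  | [] => []                            -- 'if len(preference_list) == 0: return []'
  | p :: rest => pvALoop entity strict [] p rest

-- ===== PORT B =====
-- phase 1: 'next((i for i, p in enumerate(preference_list) if entity in p), None)'
def pvBFind (entity : Int) : List (List Int) → Nat → Option Nat
  | [], _ => none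
  | p :: rest, i => if entity ∈ p then some i else pvBFind entity rest (i + 1)

def get_outranked_entities_py_alt (preference_list : List (List Int)) (entity : Int) (strict : Bool) : List Int :=
  let stop : Nat :=
    match pvBFind entity preference_list 0 with
    | none => preference_list.length
    | some t => if strict then t else t + 1
  -- phase 2: 'for p in preference_list[:end]: result += p'  (end ≥ 0, so the slice is List.take)
  (preference_list.take stop).foldl (· ++ ·) []

-- ===== PRECONDITION & SPEC =====
def Spec_get_outranked_entities_py (preference_list : List (List Int)) (entity : Int) (strict : Bool) (out : List Int) : Prop := out = get_outranked_entities_py_alt preference_list entity strict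
instance (preference_list : List (List Int)) (entity : Int) (strict : Bool) (out : List Int) : Decidable (Spec_get_outranked_entities_py preference_list entity strict out) := by unfold Spec_get_outranked_entities_py; infer_instance

-- ===== CLAIM (what is proved, stated in full; the proofs are below) =====
def Claim_equal_get_outranked_entities_py : Prop := ∀ (preference_list : List (List Int)) (entity : Int) (strict : Bool), Dom_get_outranked_entities_py preference_list entity strict → Spec_get_outranked_entities_py preference_list entity strict (get_outranked_entities_py preference_list entity strict)

-- ===== LEMMAS AND PROOFS =====

-- B's flattening loop with an arbitrary start accumulator.
theorem pvFoldl_append (l : List (List Int)) (init : List Int) :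
    l.foldl (· ++ ·) init = init ++ l.foldl (· ++ ·) [] := by
  induction l generalizing init with
  | nil => simp
  | cons p rest ih =>
    simp only [List.foldl_cons]
    rw [ih (init ++ p), ih ([] ++ p)]
    simp

-- index shift for B's search
theorem pvBFind_shift (entity : Int) (l : List (List Int)) (i : Nat) :
    pvBFind entity l i = (pvBFind entity l 0).map (· + i) := by
  induction l generalizing i with
  | nil => simp [pvBFind]
  | cons p rest ih =>
    by_cases h : entity ∈ p
    · simp [pvBFind, h]
    · simp only [pvBFind, if_neg h]
      rw [ih (i + 1), ih 1]
      cases pvBFind entity rest 0 <;> simp <;> omega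

-- B drops the head group on a miss
theorem pvAlt_cons_notmem (p : List Int) (rest : List (List Int)) (entity : Int) (strict : Bool)
    (h : entity ∉ p) :
    get_outranked_entities_py_alt (p :: rest) entity strict
      = p ++ get_outranked_entities_py_alt rest entity strict := by
  simp only [get_outranked_entities_py_alt, pvBFind, if_neg h]
  rw [pvBFind_shift entity rest 1]
  cases hf : pvBFind entity rest 0 with
  | none =>
    simp only [Option.map_none, List.length_cons, List.take_succ_cons, List.foldl_cons]
    rw [pvFoldl_append]; simp
  | some t =>
    simp only [Option.map_some]
    cases strict <;>
      · simp only [Bool.false_eq_true, if_false, if_true, List.take_succ_cons, List.foldl_cons]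
        rw [pvFoldl_append]; simp

theorem pvALoop_eq (entity : Int) (strict : Bool) :
    ∀ (rest : List (List Int)) (p : List Int) (acc : List Int),
      pvALoop entity strict acc p rest
        = acc ++ get_outranked_entities_py_alt (p :: rest) entity strict := by
  intro rest
  induction rest with
  | nil =>
    intro p acc
    by_cases h : entity ∈ p
    · simp [pvALoop, h, get_outranked_entities_py_alt, pvBFind]
      cases strict <;> simp
    · simp [pvALoop, h, get_outranked_entities_py_alt, pvBFind]
  | cons q rest' ih =>
    intro p acc
    by_cases h : entity ∈ p
    · simp [pvALoop, h, get_outranked_entities_py_alt, pvBFind]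
      cases strict <;> simp
    · simp only [pvALoop, if_neg h]
      rw [ih q (acc ++ p), pvAlt_cons_notmem p (q :: rest') entity strict h, List.append_assoc]

-- ===== VERDICT (by name: the statement is the Claim_ definition above) =====
theorem get_outranked_entities_py_spec : Claim_equal_get_outranked_entities_py := by
  intro preference_list entity strict _
  unfold Spec_get_outranked_entities_py
  cases preference_list with
  | nil => rfl
  | cons p rest =>
    simp only [get_outranked_entities_py]
    rw [pvALoop_eq entity strict rest p []]
    simp
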